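-- pv_equiv track=rewrite | github.com/laraib-786/interview_preparation | greedy/greedy_florist.py | getMinimumCost2
-- ===== SOURCE A (Python) =====
-- def getMinimumCost2(n, k, c):#removal of j
--     min_price=0
--     c.sort()
--     i=0
--     while(k*(i)+1<=n):
--             for j in range(k*i,k*(i+1)):#index (0,3),(3,6)
--                 try:
--                     if (n-1-j)>=0:# if j=5, (n-1-j)=-1 =>c[-1] is included again so better to avoid it with if.
--                         min_price+=(i+1)*c[n-1-j]
--                 except:return min_price# to avoid index error.
--             i+=1
--     return min_price
-- ===== SOURCE B (Python) =====
-- def getMinimumCost2(n, k, c):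
--     # Same in-place ascending sort as the original (observable mutation preserved).
--     c.sort()
--     if n <= 0 or n > len(c):
--         return 0
--     # Prefix sums of the sorted prices.
--     prefix = [0]
--     acc = 0
--     for x in c:
--         acc += x
--         prefix.append(acc)
--     # Every k flowers bought, all still-unbought (cheaper) flowers get one extra
--     # multiplier unit, so the answer is the sum of the prefix sums at the tier
--     # boundaries n, n-k, n-2k, ...
--     total = 0
--     m = n
--     while m > 0:
--         total += prefix[m]
--         m -= k
--     return total
-- ===== Notes on version B (the rewrite author's own statement) =====
-- stated objective: alternative
-- what changed: Replaced the per-flower multiplier accumulation (nested while/for with try/except early exit, adding (tier+1)*c[n-1-j] per flower) by a prefix-sum array summed only at the O(n/k) tier boundaries n, n-k, n-2k, ...: total = sum of prefix[m] for m = n, n-k, ..., correct because each boundary pass counts every cheaper still-unbought flower once more.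
import Mathlib
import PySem

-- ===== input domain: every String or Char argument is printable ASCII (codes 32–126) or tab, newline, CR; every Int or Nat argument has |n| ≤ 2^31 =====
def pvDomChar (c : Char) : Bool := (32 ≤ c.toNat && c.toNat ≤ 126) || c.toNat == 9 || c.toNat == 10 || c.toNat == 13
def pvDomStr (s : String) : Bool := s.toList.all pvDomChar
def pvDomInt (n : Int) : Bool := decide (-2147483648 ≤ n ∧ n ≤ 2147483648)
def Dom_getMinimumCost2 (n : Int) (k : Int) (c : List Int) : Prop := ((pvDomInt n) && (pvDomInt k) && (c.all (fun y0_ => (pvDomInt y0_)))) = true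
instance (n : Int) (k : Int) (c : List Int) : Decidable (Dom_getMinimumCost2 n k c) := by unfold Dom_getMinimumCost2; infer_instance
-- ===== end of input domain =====

-- B replaces A's per-flower multiplier accumulation (nested while/for with try/except
-- early exit) by a prefix-sum array summed at the tier boundaries n, n-k, n-2k, …
-- (objective: alternative). Both Pythons sort c in place (same mutation); the
-- equivalence proved here is about the return value.

-- ===== PORT A =====
-- inner 'for j in range(k*i, k*(i+1))' with the try/except: .inl = early 'return min_price'
-- on IndexError (pyGet? = none), .inr = fall through to 'i += 1'
-- j counts up lazily, as Python's range does; fuel = number of remaining iterations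
def pvAInner (n : Int) (i : Int) (c : List Int) : Nat → Int → Int → Int ⊕ Int
  | 0, _, acc => .inr acc
  | fuel + 1, j, acc =>
    if 0 ≤ n - 1 - j then
      match PySem.List.pyGet? c (n - 1 - j) with
      | none => .inl acc
      | some v => pvAInner n i c fuel (j + 1) (acc + (i + 1) * v)
    else pvAInner n i c fuel (j + 1) acc

-- 'while k*i+1 <= n'; the fuel only makes the loop total (for k ≤ 0 ∧ 1 ≤ n the Python
-- while-loop never terminates — excluded by Pre_); n.toNat+1 iterations always suffice when 1 ≤ k.
def pvALoop (n : Int) (k : Int) (c : List Int) : Nat → Int → Int → Int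
  | 0, _, acc => acc
  | fuel + 1, i, acc =>
    if k * i + 1 ≤ n then
      match pvAInner n i c (k * (i + 1) - k * i).toNat (k * i) acc with
      | .inl r => r
      | .inr acc' => pvALoop n k c fuel (i + 1) acc'
    else acc

def getMinimumCost2 (n : Int) (k : Int) (c : List Int) : Int :=
  pvALoop n k (PySem.List.sorted c (fun x => x) false) (n.toNat + 1) 0 0

-- ===== PORT B =====
-- 'prefix = [0]; acc = 0; for x in c: acc += x; prefix.append(acc)' — fold carrying (prefix, acc)
def pvPrefix (c : List Int) : List Int :=
  (c.foldl (fun (st : List Int × Int) x => (st.1 ++ [st.2 + x], st.2 + x)) ([0], 0)).1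

-- 'while m > 0: total += prefix[m]; m -= k'; fuel only makes the loop total (for k ≤ 0
-- it diverges in Python too — outside Pre_); n.toNat+1 iterations suffice when 1 ≤ k.
-- prefix[m] is ported as the total pyGetD with default 0: exact, since under the guard
-- 0 < m ≤ n ≤ len(c) the index m is always in range of prefix (length len(c)+1).
def pvBLoop (k : Int) (pr : List Int) : Nat → Int → Int → Int
  | 0, _, total => total
  | fuel + 1, m, total =>
    if 0 < m then pvBLoop k pr fuel (m - k) (total + PySem.List.pyGetD pr m 0)
    else total

def getMinimumCost2_alt (n : Int) (k : Int) (c : List Int) : Int :=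
  let s := PySem.List.sorted c (fun x => x) false
  if n ≤ 0 ∨ PySem.List.len s < n then 0
  else pvBLoop k (pvPrefix s) (n.toNat + 1) n 0

-- ===== PRECONDITION & SPEC =====
-- Pre_ excludes exactly k ≤ 0 ∧ 1 ≤ n, where A's while-loop never terminates (Python diverges);
-- A returns normally on every other input.
def Pre_getMinimumCost2 (n : Int) (k : Int) (c : List Int) : Prop := 1 ≤ k ∨ n ≤ 0
instance (n : Int) (k : Int) (c : List Int) : Decidable (Pre_getMinimumCost2 n k c) := by unfold Pre_getMinimumCost2; infer_instance
def pvWitness_getMinimumCost2 : Int × Int × List Int := (3, 2, [2, 5, 6])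
def Spec_getMinimumCost2 (n : Int) (k : Int) (c : List Int) (out : Int) : Prop := out = getMinimumCost2_alt n k c
instance (n : Int) (k : Int) (c : List Int) (out : Int) : Decidable (Spec_getMinimumCost2 n k c out) := by unfold Spec_getMinimumCost2; infer_instance

-- ===== CLAIM (what is proved, stated in full; the proofs are below) =====
def Claim_equal_getMinimumCost2 : Prop := ∀ (n : Int) (k : Int) (c : List Int), Dom_getMinimumCost2 n k c → Pre_getMinimumCost2 n k c → Spec_getMinimumCost2 n k c (getMinimumCost2 n k c)

-- ===== LEMMAS AND PROOFS =====

-- the inner for-loop never hits the except when n ≤ len(s): it returns .inr of acc plus the chunk sum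
theorem pvAInner_eq (n i : Int) (s : List Int) (hn : n ≤ (s.length : Int)) :
    ∀ (fuel : Nat) (j : Int), 0 ≤ j → ∀ (acc : Int),
      pvAInner n i s fuel j acc =
        .inr (acc + ((PySem.List.pyRange j (j + (fuel : Int)) 1).map (fun j =>
          if 0 ≤ n - 1 - j then (i + 1) * PySem.List.pyGetD s (n - 1 - j) 0 else 0)).sum) := by
  intro fuel
  induction fuel with
  | zero =>
    intro j hj acc
    rw [pvAInner, PySem.List.pyRange_one_eq_nil (by omega)]
    simp
  | succ fuel ih =>
    intro j hj acc
    rw [pvAInner,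
        PySem.List.pyRange_one_cons (show j < j + ((fuel + 1 : Nat) : Int) by push_cast; omega)]
    simp only [List.map_cons, List.sum_cons]
    have harg : j + 1 + (fuel : Int) = j + ((fuel + 1 : Nat) : Int) := by push_cast; ring
    by_cases hcond : 0 ≤ n - 1 - j
    · rw [if_pos hcond, if_pos hcond]
      have hlt : n - 1 - j < (s.length : Int) := by omega
      rw [PySem.List.pyGet?_eq_some_getElem s hcond hlt]
      dsimp only
      rw [ih (j + 1) (by omega) (acc + (i + 1) * s[(n - 1 - j).toNat]), harg]
      rw [PySem.List.pyGetD_eq_getElem s 0 hcond hlt]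
      congr 1
      ring
    · rw [if_neg hcond, if_neg hcond, ih (j + 1) (by omega) acc, harg]
      congr 1
      ring

-- the while-loop computes acc plus the closed-form sum over the remaining indices [k*i, n)
theorem pvALoop_eq (n k : Int) (s : List Int) (hk : 1 ≤ k) (hn : n ≤ (s.length : Int)) :
    ∀ (fuel : Nat) (i acc : Int), 0 ≤ i → n - k * i ≤ (fuel : Int) →
      pvALoop n k s fuel i acc =
        acc + ((PySem.List.pyRange (k * i) n 1).map (fun j =>
          if 0 ≤ n - 1 - j then
            (PySem.Int.floordiv j k + 1) * PySem.List.pyGetD s (n - 1 - j) 0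
          else 0)).sum := by
  intro fuel
  induction fuel with
  | zero =>
    intro i acc hi hf
    rw [pvALoop, PySem.List.pyRange_one_eq_nil (by push_cast at hf; omega)]
    simp
  | succ fuel ih =>
    intro i acc hi hf
    rw [pvALoop]
    by_cases hc : k * i + 1 ≤ n
    · have hki : (0:Int) ≤ k * i := mul_nonneg (by omega) hi
      have hkk : k * (i + 1) = k * i + k := by ring
      have hfu : k * i + (((k * (i + 1) - k * i).toNat : Nat) : Int) = k * (i + 1) := by
        rw [hkk]; omega
      rw [if_pos hc, pvAInner_eq n i s hn _ (k * i) hki, hfu]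
      dsimp only
      have hstep : n - k * (i + 1) ≤ (fuel : Int) := by
        rw [hkk]; push_cast at hf ⊢; omega
      rw [ih (i + 1) _ (by omega) hstep]
      have hchunk : (PySem.List.pyRange (k * i) (k * (i + 1)) 1).map (fun j =>
            if 0 ≤ n - 1 - j then (i + 1) * PySem.List.pyGetD s (n - 1 - j) 0 else 0)
          = (PySem.List.pyRange (k * i) (k * (i + 1)) 1).map (fun j =>
            if 0 ≤ n - 1 - j then
              (PySem.Int.floordiv j k + 1) * PySem.List.pyGetD s (n - 1 - j) 0
            else 0) := by
        apply List.map_congr_left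
        intro j hj
        rw [PySem.List.mem_pyRange_one] at hj
        have hdiv : PySem.Int.floordiv j k = i := by
          rw [PySem.Int.floordiv_eq_iff_of_pos (by omega)]
          constructor
          · calc i * k = k * i := by ring
              _ ≤ j := hj.1
          · calc j < k * (i + 1) := hj.2
              _ = (i + 1) * k := by ring
        rw [hdiv]
      rw [hchunk]
      by_cases hsplit : k * (i + 1) ≤ n
      · rw [PySem.List.pyRange_one_append (k * i) (k * (i + 1)) n (by rw [hkk]; omega) hsplit,
            List.map_append, List.sum_append]
        ring
      · rw [PySem.List.pyRange_one_eq_nil (show n ≤ k * (i + 1) by omega)]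
        rw [PySem.List.pyRange_one_append (k * i) n (k * (i + 1)) (by omega) (by omega),
            List.map_append, List.sum_append]
        have hzero : ((PySem.List.pyRange n (k * (i + 1)) 1).map (fun j =>
            if 0 ≤ n - 1 - j then
              (PySem.Int.floordiv j k + 1) * PySem.List.pyGetD s (n - 1 - j) 0
            else 0)).sum = 0 := by
          apply List.sum_eq_zero
          intro x hx
          simp only [List.mem_map] at hx
          obtain ⟨j, hj, rfl⟩ := hx
          rw [PySem.List.mem_pyRange_one] at hj
          rw [if_neg (by omega)]
        rw [hzero]
        simp
    · rw [if_neg hc, PySem.List.pyRange_one_eq_nil (by omega)]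
      simp

-- the prefix fold: result list = old list ++ running sums offset by the accumulator
theorem pvPrefix_aux (s : List Int) : ∀ (p : List Int) (a : Int),
    (s.foldl (fun (st : List Int × Int) x => (st.1 ++ [st.2 + x], st.2 + x)) (p, a)).1
      = p ++ (List.range s.length).map (fun i => a + (s.take (i + 1)).sum) := by
  induction s with
  | nil => intro p a; simp
  | cons x t ih =>
    intro p a
    simp only [List.foldl_cons]
    rw [ih (p ++ [a + x]) (a + x)]
    simp only [List.length_cons, List.range_succ_eq_map, List.map_cons, List.map_map,
      List.take_succ_cons, List.sum_cons, List.take_zero, List.sum_nil, List.append_assoc,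
      List.singleton_append]
    congr 1
    congr 1
    · ring
    apply List.map_congr_left
    intro i _
    simp only [Function.comp, Nat.succ_eq_add_one]
    ring

-- prefix[i] = sum of the first i elements
theorem pvPrefix_getD (s : List Int) (i : Nat) (hi : i ≤ s.length) :
    (pvPrefix s).getD i 0 = (s.take i).sum := by
  unfold pvPrefix
  rw [pvPrefix_aux s [0] 0]
  cases i with
  | zero => simp
  | succ j =>
    have hj : j < s.length := by omega
    rw [List.singleton_append, List.getD_cons_succ, List.getD_eq_getElem _ _ (by simpa using hj)]
    simp [hj]

-- the reversed-window sum: Σ_{t<m} s[m-1-t] = sum of the first m elements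
theorem sum_rev (s : List Int) (m : Int) (h0 : 0 ≤ m) (hm : m ≤ (s.length : Int)) :
    (List.map (fun t : Nat => PySem.List.pyGetD s (m - 1 - (t : Int)) 0) (List.range m.toNat)).sum
      = (s.take m.toNat).sum := by
  rw [← List.sum_reverse (s.take m.toNat)]
  congr 1
  apply List.ext_getElem
  · simp; omega
  · intro i h1 h2
    have hi : i < m.toNat := by simpa using h1
    simp only [List.getElem_map, List.getElem_range]
    rw [List.getElem_reverse, List.getElem_take]
    have hmin : min m.toNat s.length = m.toNat := by omega
    simp only [List.length_take, hmin]
    have hidx : m - 1 - (i : Int) = ((m.toNat - 1 - i : Nat) : Int) := by omega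
    rw [hidx, PySem.List.pyGetD_natCast]
    rw [List.getD_eq_getElem _ _ (by omega)]

theorem fd_small (k : Int) (hk : 1 ≤ k) (t : Int) (h0 : 0 ≤ t) (ht : t < k) :
    PySem.Int.floordiv t k = 0 := by
  rw [PySem.Int.floordiv_eq_iff_of_pos (by omega)]
  constructor <;> omega

theorem fd_shift (k : Int) (hk : 1 ≤ k) (u : Int) :
    PySem.Int.floordiv (k + u) k = PySem.Int.floordiv u k + 1 := by
  rw [PySem.Int.floordiv_eq_ediv_of_pos (by omega), PySem.Int.floordiv_eq_ediv_of_pos (by omega),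
      show k + u = u + k * 1 by ring, Int.add_mul_ediv_left u 1 (by omega)]

-- KEY recurrence: the multiplier sum at boundary m = prefix-sum(m) + multiplier sum at m-k
theorem key_rec (s : List Int) (k m : Int) (hk : 1 ≤ k) (h0 : 0 < m) (hm : m ≤ (s.length : Int)) :
    (List.map (fun t : Nat =>
        (PySem.Int.floordiv (t : Int) k + 1) * PySem.List.pyGetD s (m - 1 - (t : Int)) 0) (List.range m.toNat)).sum
      = (s.take m.toNat).sum
        + (List.map (fun t : Nat =>
            (PySem.Int.floordiv (t : Int) k + 1) * PySem.List.pyGetD s (m - k - 1 - (t : Int)) 0) (List.range (m - k).toNat)).sum := by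
  by_cases hcase : m ≤ k
  · have h2 : (m - k).toNat = 0 := by omega
    rw [h2]
    simp only [List.range_zero, List.map_nil, List.sum_nil, add_zero]
    rw [List.map_congr_left (g := fun t : Nat => PySem.List.pyGetD s (m - 1 - (t : Int)) 0)
        (by intro t ht
            rw [List.mem_range] at ht
            rw [fd_small k hk t (by omega) (by omega)]
            ring)]
    exact sum_rev s m (by omega) hm
  · -- k < m: split the range at k.toNat
    have hN : m.toNat = k.toNat + (m - k).toNat := by omega
    have hKc : ((k.toNat : Nat) : Int) = k := by omega
    have hsplit : ∀ (f : Nat → Int),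
        (List.map f (List.range m.toNat)).sum
          = (List.map f (List.range k.toNat)).sum
            + (List.map (fun u : Nat => f (k.toNat + u)) (List.range (m - k).toNat)).sum := by
      intro f
      rw [hN, List.range_add, List.map_append, List.sum_append, List.map_map]
      rfl
    rw [hsplit]
    -- first chunk: multiplier is 1
    rw [List.map_congr_left (l := List.range k.toNat)
        (g := fun t : Nat => PySem.List.pyGetD s (m - 1 - (t : Int)) 0)
        (by intro t ht
            rw [List.mem_range] at ht
            rw [fd_small k hk t (by omega) (by omega)]
            ring)]
    -- second chunk: shift the divisor out and split the multiplier
    rw [List.map_congr_left (l := List.range (m - k).toNat)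
        (g := fun u : Nat =>
          (PySem.Int.floordiv (u : Int) k + 1) * PySem.List.pyGetD s (m - k - 1 - (u : Int)) 0
            + PySem.List.pyGetD s (m - k - 1 - (u : Int)) 0)
        (by intro u hu
            rw [List.mem_range] at hu
            have h1 : ((k.toNat + u : Nat) : Int) = k + (u : Int) := by omega
            simp only [h1]
            rw [fd_shift k hk u]
            have h2 : m - 1 - (k + (u : Int)) = m - k - 1 - (u : Int) := by ring
            rw [h2]
            ring)]
    rw [PySem.List.sum_map_add_int]
    -- the two reversed-window sums
    have hrev1 := sum_rev s m (by omega) hm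
    rw [hsplit (fun t : Nat => PySem.List.pyGetD s (m - 1 - (t : Int)) 0)] at hrev1
    have heq : (List.map (fun u : Nat =>
        PySem.List.pyGetD s (m - 1 - ((k.toNat + u : Nat) : Int)) 0) (List.range (m - k).toNat))
        = List.map (fun u : Nat => PySem.List.pyGetD s (m - k - 1 - (u : Int)) 0) (List.range (m - k).toNat) := by
      apply List.map_congr_left
      intro u hu
      have h1 : m - 1 - ((k.toNat + u : Nat) : Int) = m - k - 1 - (u : Int) := by omega
      rw [h1]
    rw [heq] at hrev1
    have hrev2 := sum_rev s (m - k) (by omega) (by omega)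
    rw [hrev2] at hrev1 ⊢
    linarith [hrev1]

-- B's while-loop equals the multiplier sum at its current boundary m
theorem pvBLoop_eq (s : List Int) (k : Int) (hk : 1 ≤ k) :
    ∀ (fuel : Nat) (m total : Int), m ≤ (fuel : Int) → m ≤ (s.length : Int) →
      pvBLoop k (pvPrefix s) fuel m total
        = total + (List.map (fun t : Nat =>
            (PySem.Int.floordiv (t : Int) k + 1) * PySem.List.pyGetD s (m - 1 - (t : Int)) 0) (List.range m.toNat)).sum := by
  intro fuel
  induction fuel with
  | zero =>
    intro m total hf _
    have h0 : m.toNat = 0 := by omega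
    rw [pvBLoop, h0]
    simp
  | succ fuel ih =>
    intro m total hf hm
    rw [pvBLoop]
    by_cases hpos : 0 < m
    · rw [if_pos hpos]
      rw [ih (m - k) _ (by push_cast at hf ⊢; omega) (by omega)]
      have hpre : PySem.List.pyGetD (pvPrefix s) m 0 = (s.take m.toNat).sum := by
        have hcast : m = ((m.toNat : Nat) : Int) := by omega
        rw [hcast, PySem.List.pyGetD_natCast]
        exact pvPrefix_getD s m.toNat (by omega)
      rw [hpre, key_rec s k m hk hpos hm]
      ring
    · rw [if_neg hpos]
      have h0 : m.toNat = 0 := by omega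
      rw [h0]
      simp

-- ===== VERDICT (by name: the statement is the Claim_ definition above) =====
theorem getMinimumCost2_spec : Claim_equal_getMinimumCost2 := by
  intro n k c _ hpre
  unfold Spec_getMinimumCost2 getMinimumCost2 getMinimumCost2_alt
  set s := PySem.List.sorted c (fun x => x) false with hs
  by_cases hn : n ≤ 0
  · rw [if_pos (Or.inl hn)]
    rw [pvALoop, if_neg (by omega)]
  · have hk : 1 ≤ k := hpre.resolve_right hn
    by_cases hlen : n ≤ (s.length : Int)
    · rw [if_neg (by simp only [PySem.List.len_eq]; omega)]
      have hA := pvALoop_eq n k s hk hlen (n.toNat + 1) 0 0 le_rfl (by push_cast; omega)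
      rw [mul_zero] at hA
      rw [hA, zero_add]
      rw [pvBLoop_eq s k hk (n.toNat + 1) n 0 (by push_cast; omega) hlen, zero_add]
      have hrw : PySem.List.pyRange 0 n 1 = List.map (fun t : Nat => (t : Int)) (List.range n.toNat) := by
        rw [PySem.List.pyRange_one]
        simp only [zero_add, sub_zero]
      rw [hrw, List.map_map]
      apply congrArg
      apply List.map_congr_left
      intro t ht
      rw [List.mem_range] at ht
      simp only [Function.comp]
      rw [if_pos (by omega)]
    · rw [if_pos (Or.inr (by simp only [PySem.List.len_eq]; omega))]
      rw [pvALoop, if_pos (by omega)]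
      have hkone : (k * ((0:Int) + 1) - 0).toNat = k.toNat := by norm_num
      rw [mul_zero, hkone]
      obtain ⟨m, hm⟩ := Nat.exists_eq_succ_of_ne_zero (show k.toNat ≠ 0 by omega)
      rw [hm, pvAInner, if_pos (by omega)]
      have hnone : PySem.List.pyGet? s (n - 1 - 0) = none := by
        rw [PySem.List.pyGet?_eq_none_iff]
        simp only [PySem.Raise.InRange]
        omega
      rw [hnone]
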